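-- pv_equiv track=rewrite | github.com/Beykus-Y/Selara_Bot | src/selara/presentation/handlers/relationships.py | _current_marriage_milestone
-- ===== SOURCE A (Python) =====
-- from typing import NamedTuple
--
-- class _Milestone(NamedTuple):
--     days: int
--     label: str
--
-- _MARRIAGE_MILESTONES: list[_Milestone] = [
--     _Milestone(1,     "Медовый день 🍯"),
--     _Milestone(7,     "Первая неделя 💌"),
--     _Milestone(14,    "Две недели вместе 💞"),
--     _Milestone(30,    "Первый месяц 🌸"),
--     _Milestone(60,    "Два месяца вместе 🌺"),
--     _Milestone(90,    "Три месяца вместе 🌻"),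
--     _Milestone(180,   "Полгода вместе 🌿"),
--     _Milestone(270,   "Девять месяцев вместе ✨"),
--     _Milestone(365,   "Ситцевая свадьба 🎀"),
--     _Milestone(500,   "500 дней вместе ⭐"),
--     _Milestone(730,   "Бумажная свадьба 📜"),
--     _Milestone(1095,  "Кожаная свадьба 🍂"),
--     _Milestone(1825,  "Деревянная свадьба 🌳"),
--     _Milestone(2555,  "Железная свадьба ⚙️"),
--     _Milestone(3650,  "Оловянная свадьба 🔩"),
--     _Milestone(9131,  "Серебряная свадьба 🥈"),
--     _Milestone(18262, "Золотая свадьба 👑"),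
-- ]
--
-- def _current_marriage_milestone(days_elapsed: int) -> _Milestone | None:
--     """Returns the highest milestone reached so far."""
--     reached = None
--     for m in _MARRIAGE_MILESTONES:
--         if days_elapsed >= m.days:
--             reached = m
--         else:
--             break
--     return reached
-- ===== SOURCE B (Python) =====
-- import bisect
-- from typing import NamedTuple
--
-- class _Milestone(NamedTuple):
--     days: int
--     label: str
--
-- _MARRIAGE_MILESTONES: list[_Milestone] = [
--     _Milestone(1,     "Медовый день 🍯"),
--     _Milestone(7,     "Первая неделя 💌"),
--     _Milestone(14,    "Две недели вместе 💞"),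
--     _Milestone(30,    "Первый месяц 🌸"),
--     _Milestone(60,    "Два месяца вместе 🌺"),
--     _Milestone(90,    "Три месяца вместе 🌻"),
--     _Milestone(180,   "Полгода вместе 🌿"),
--     _Milestone(270,   "Девять месяцев вместе ✨"),
--     _Milestone(365,   "Ситцевая свадьба 🎀"),
--     _Milestone(500,   "500 дней вместе ⭐"),
--     _Milestone(730,   "Бумажная свадьба 📜"),
--     _Milestone(1095,  "Кожаная свадьба 🍂"),
--     _Milestone(1825,  "Деревянная свадьба 🌳"),
--     _Milestone(2555,  "Железная свадьба ⚙️"),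
--     _Milestone(3650,  "Оловянная свадьба 🔩"),
--     _Milestone(9131,  "Серебряная свадьба 🥈"),
--     _Milestone(18262, "Золотая свадьба 👑"),
-- ]
--
-- _DAYS = [m.days for m in _MARRIAGE_MILESTONES]
--
-- def _current_marriage_milestone(days_elapsed: int) -> _Milestone | None:
--     """Returns the highest milestone reached so far (binary search)."""
--     idx = bisect.bisect_right(_DAYS, days_elapsed)
--     if idx == 0:
--         return None
--     return _MARRIAGE_MILESTONES[idx - 1]
-- ===== Notes on version B (the rewrite author's own statement) =====
-- stated objective: idiomatic
-- what changed: Replaces the linear break-loop that tracks the last reached milestone with bisect.bisect_right over the precomputed ascending threshold list, indexing the milestone directly.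
import Mathlib
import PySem

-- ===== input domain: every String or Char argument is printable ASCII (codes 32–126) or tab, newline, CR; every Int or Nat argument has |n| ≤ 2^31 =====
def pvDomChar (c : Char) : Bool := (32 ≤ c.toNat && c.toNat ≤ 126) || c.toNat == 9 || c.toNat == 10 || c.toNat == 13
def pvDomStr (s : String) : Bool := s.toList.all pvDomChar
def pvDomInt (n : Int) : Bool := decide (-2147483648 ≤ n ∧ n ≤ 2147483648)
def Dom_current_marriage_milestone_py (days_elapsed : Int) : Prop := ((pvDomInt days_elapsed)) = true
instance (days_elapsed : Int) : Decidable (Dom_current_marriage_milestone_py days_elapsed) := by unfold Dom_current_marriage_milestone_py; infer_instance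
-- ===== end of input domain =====

-- B replaces A's linear break-loop with a bisect_right binary search over the threshold list (idiomatic; same result).
-- ===== PORT A =====
def pvMilestones : List (Int × String) := [
  (1, "Медовый день 🍯"),
  (7, "Первая неделя 💌"),
  (14, "Две недели вместе 💞"),
  (30, "Первый месяц 🌸"),
  (60, "Два месяца вместе 🌺"),
  (90, "Три месяца вместе 🌻"),
  (180, "Полгода вместе 🌿"),
  (270, "Девять месяцев вместе ✨"),
  (365, "Ситцевая свадьба 🎀"),
  (500, "500 дней вместе ⭐"),
  (730, "Бумажная свадьба 📜"),
  (1095, "Кожаная свадьба 🍂"),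
  (1825, "Деревянная свадьба 🌳"),
  (2555, "Железная свадьба ⚙️"),
  (3650, "Оловянная свадьба 🔩"),
  (9131, "Серебряная свадьба 🥈"),
  (18262, "Золотая свадьба 👑")]

-- A's loop: walk the list, remember the last milestone reached, break at the first not reached.
def pvLoopA : List (Int × String) → Option (Int × String) → Int → Option (Int × String)
  | [], reached, _ => reached
  | m :: rest, reached, d => if d ≥ m.1 then pvLoopA rest (some m) d else reached

def current_marriage_milestone_py (days_elapsed : Int) : Option (Int × String) :=
  pvLoopA pvMilestones none days_elapsed

-- ===== PORT B =====
def pvDays : List Int := pvMilestones.map Prod.fst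

-- bisect.bisect_right(a, x) with lo/hi bounds, as in CPython.
def pvBisectRight (a : List Int) (x : Int) (lo hi : Nat) : Nat :=
  if lo < hi then
    let mid := (lo + hi) / 2
    if x < a.getD mid 0 then pvBisectRight a x lo mid
    else pvBisectRight a x (mid + 1) hi
  else lo
termination_by hi - lo
decreasing_by all_goals omega

def current_marriage_milestone_py_alt (days_elapsed : Int) : Option (Int × String) :=
  let idx := pvBisectRight pvDays days_elapsed 0 pvDays.length
  if idx = 0 then none else pvMilestones[idx - 1]?


-- ===== PRECONDITION & SPEC =====
def Spec_current_marriage_milestone_py (days_elapsed : Int) (out : Option (Int × String)) : Prop := out = current_marriage_milestone_py_alt days_elapsed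
instance (days_elapsed : Int) (out : Option (Int × String)) : Decidable (Spec_current_marriage_milestone_py days_elapsed out) := by unfold Spec_current_marriage_milestone_py; infer_instance

-- ===== CLAIM (what is proved, stated in full; the proofs are below) =====
def Claim_equal_current_marriage_milestone_py : Prop := ∀ (days_elapsed : Int), Dom_current_marriage_milestone_py days_elapsed → Spec_current_marriage_milestone_py days_elapsed (current_marriage_milestone_py days_elapsed)

-- ===== LEMMAS AND PROOFS =====

-- ===== VERDICT (by name: the statement is the Claim_ definition above) =====

-- index of the first threshold strictly greater than d (closed evaluation of the binary search)
def pvIdx (d : Int) : Nat :=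
  if d < 1 then 0 else if d < 7 then 1 else if d < 14 then 2 else if d < 30 then 3 else if d < 60 then 4 else if d < 90 then 5 else if d < 180 then 6 else if d < 270 then 7 else if d < 365 then 8 else if d < 500 then 9 else if d < 730 then 10 else if d < 1095 then 11 else if d < 1825 then 12 else if d < 2555 then 13 else if d < 3650 then 14 else if d < 9131 then 15 else if d < 18262 then 16 else 17

set_option maxRecDepth 4000 in
set_option maxHeartbeats 4000000 in
theorem pvBisect_eval (d : Int) : pvBisectRight pvDays d 0 pvDays.length = pvIdx d := by
  simp only [pvDays, pvMilestones, List.map, List.length]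
  simp [pvBisectRight, List.getD, pvIdx]
  by_cases h0 : d < 1
  · simp [(show d < 1 by omega), (show d < 7 by omega), (show d < 14 by omega), (show d < 60 by omega), (show d < 365 by omega)]
  · 
    by_cases h1 : d < 7
    · simp [(show ¬ d < 1 by omega), (show d < 7 by omega), (show d < 14 by omega), (show d < 60 by omega), (show d < 365 by omega)]
    · 
      by_cases h2 : d < 14
      · simp [(show ¬ d < 1 by omega), (show ¬ d < 7 by omega), (show d < 14 by omega), (show d < 60 by omega), (show d < 365 by omega)]
      · 
        by_cases h3 : d < 30
        · simp [(show ¬ d < 1 by omega), (show ¬ d < 7 by omega), (show ¬ d < 14 by omega), (show d < 30 by omega), (show d < 60 by omega), (show d < 365 by omega)]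
        · 
          by_cases h4 : d < 60
          · simp [(show ¬ d < 1 by omega), (show ¬ d < 7 by omega), (show ¬ d < 14 by omega), (show ¬ d < 30 by omega), (show d < 60 by omega), (show d < 365 by omega)]
          · 
            by_cases h5 : d < 90
            · simp [(show ¬ d < 1 by omega), (show ¬ d < 7 by omega), (show ¬ d < 14 by omega), (show ¬ d < 30 by omega), (show ¬ d < 60 by omega), (show d < 90 by omega), (show d < 180 by omega), (show d < 365 by omega)]
            · 
              by_cases h6 : d < 180
              · simp [(show ¬ d < 1 by omega), (show ¬ d < 7 by omega), (show ¬ d < 14 by omega), (show ¬ d < 30 by omega), (show ¬ d < 60 by omega), (show ¬ d < 90 by omega), (show d < 180 by omega), (show d < 365 by omega)]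
              · 
                by_cases h7 : d < 270
                · simp [(show ¬ d < 1 by omega), (show ¬ d < 7 by omega), (show ¬ d < 14 by omega), (show ¬ d < 30 by omega), (show ¬ d < 60 by omega), (show ¬ d < 90 by omega), (show ¬ d < 180 by omega), (show d < 270 by omega), (show d < 365 by omega)]
                · 
                  by_cases h8 : d < 365
                  · simp [(show ¬ d < 1 by omega), (show ¬ d < 7 by omega), (show ¬ d < 14 by omega), (show ¬ d < 30 by omega), (show ¬ d < 60 by omega), (show ¬ d < 90 by omega), (show ¬ d < 180 by omega), (show ¬ d < 270 by omega), (show d < 365 by omega)]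
                  · 
                    by_cases h9 : d < 500
                    · simp [(show ¬ d < 1 by omega), (show ¬ d < 7 by omega), (show ¬ d < 14 by omega), (show ¬ d < 30 by omega), (show ¬ d < 60 by omega), (show ¬ d < 90 by omega), (show ¬ d < 180 by omega), (show ¬ d < 270 by omega), (show ¬ d < 365 by omega), (show d < 500 by omega), (show d < 730 by omega), (show d < 1095 by omega), (show d < 2555 by omega)]
                    · 
                      by_cases h10 : d < 730
                      · simp [(show ¬ d < 1 by omega), (show ¬ d < 7 by omega), (show ¬ d < 14 by omega), (show ¬ d < 30 by omega), (show ¬ d < 60 by omega), (show ¬ d < 90 by omega), (show ¬ d < 180 by omega), (show ¬ d < 270 by omega), (show ¬ d < 365 by omega), (show ¬ d < 500 by omega), (show d < 730 by omega), (show d < 1095 by omega), (show d < 2555 by omega)]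
                      · 
                        by_cases h11 : d < 1095
                        · simp [(show ¬ d < 1 by omega), (show ¬ d < 7 by omega), (show ¬ d < 14 by omega), (show ¬ d < 30 by omega), (show ¬ d < 60 by omega), (show ¬ d < 90 by omega), (show ¬ d < 180 by omega), (show ¬ d < 270 by omega), (show ¬ d < 365 by omega), (show ¬ d < 500 by omega), (show ¬ d < 730 by omega), (show d < 1095 by omega), (show d < 2555 by omega)]
                        · 
                          by_cases h12 : d < 1825
                          · simp [(show ¬ d < 1 by omega), (show ¬ d < 7 by omega), (show ¬ d < 14 by omega), (show ¬ d < 30 by omega), (show ¬ d < 60 by omega), (show ¬ d < 90 by omega), (show ¬ d < 180 by omega), (show ¬ d < 270 by omega), (show ¬ d < 365 by omega), (show ¬ d < 500 by omega), (show ¬ d < 730 by omega), (show ¬ d < 1095 by omega), (show d < 1825 by omega), (show d < 2555 by omega)]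
                          · 
                            by_cases h13 : d < 2555
                            · simp [(show ¬ d < 1 by omega), (show ¬ d < 7 by omega), (show ¬ d < 14 by omega), (show ¬ d < 30 by omega), (show ¬ d < 60 by omega), (show ¬ d < 90 by omega), (show ¬ d < 180 by omega), (show ¬ d < 270 by omega), (show ¬ d < 365 by omega), (show ¬ d < 500 by omega), (show ¬ d < 730 by omega), (show ¬ d < 1095 by omega), (show ¬ d < 1825 by omega), (show d < 2555 by omega)]
                            · 
                              by_cases h14 : d < 3650
                              · simp [(show ¬ d < 1 by omega), (show ¬ d < 7 by omega), (show ¬ d < 14 by omega), (show ¬ d < 30 by omega), (show ¬ d < 60 by omega), (show ¬ d < 90 by omega), (show ¬ d < 180 by omega), (show ¬ d < 270 by omega), (show ¬ d < 365 by omega), (show ¬ d < 500 by omega), (show ¬ d < 730 by omega), (show ¬ d < 1095 by omega), (show ¬ d < 1825 by omega), (show ¬ d < 2555 by omega), (show d < 3650 by omega), (show d < 9131 by omega)]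
                              · 
                                by_cases h15 : d < 9131
                                · simp [(show ¬ d < 1 by omega), (show ¬ d < 7 by omega), (show ¬ d < 14 by omega), (show ¬ d < 30 by omega), (show ¬ d < 60 by omega), (show ¬ d < 90 by omega), (show ¬ d < 180 by omega), (show ¬ d < 270 by omega), (show ¬ d < 365 by omega), (show ¬ d < 500 by omega), (show ¬ d < 730 by omega), (show ¬ d < 1095 by omega), (show ¬ d < 1825 by omega), (show ¬ d < 2555 by omega), (show ¬ d < 3650 by omega), (show d < 9131 by omega)]
                                · 
                                  by_cases h16 : d < 18262
                                  · simp [(show ¬ d < 1 by omega), (show ¬ d < 7 by omega), (show ¬ d < 14 by omega), (show ¬ d < 30 by omega), (show ¬ d < 60 by omega), (show ¬ d < 90 by omega), (show ¬ d < 180 by omega), (show ¬ d < 270 by omega), (show ¬ d < 365 by omega), (show ¬ d < 500 by omega), (show ¬ d < 730 by omega), (show ¬ d < 1095 by omega), (show ¬ d < 1825 by omega), (show ¬ d < 2555 by omega), (show ¬ d < 3650 by omega), (show ¬ d < 9131 by omega), (show d < 18262 by omega)]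
                                  · simp [(show ¬ d < 1 by omega), (show ¬ d < 7 by omega), (show ¬ d < 14 by omega), (show ¬ d < 30 by omega), (show ¬ d < 60 by omega), (show ¬ d < 90 by omega), (show ¬ d < 180 by omega), (show ¬ d < 270 by omega), (show ¬ d < 365 by omega), (show ¬ d < 500 by omega), (show ¬ d < 730 by omega), (show ¬ d < 1095 by omega), (show ¬ d < 1825 by omega), (show ¬ d < 2555 by omega), (show ¬ d < 3650 by omega), (show ¬ d < 9131 by omega), (show ¬ d < 18262 by omega)]

set_option maxRecDepth 4000 in
set_option maxHeartbeats 4000000 in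
theorem current_marriage_milestone_py_spec : Claim_equal_current_marriage_milestone_py := by
  intro d _
  unfold Spec_current_marriage_milestone_py
  unfold current_marriage_milestone_py current_marriage_milestone_py_alt
  rw [pvBisect_eval]
  simp only [pvMilestones, pvLoopA, pvIdx]
  by_cases h0 : d < 1
  · simp [(show d < 1 by omega), (show ¬ d ≥ 1 by omega)]
  · 
    by_cases h1 : d < 7
    · simp [(show ¬ d < 1 by omega), (show d ≥ 1 by omega), (show d < 7 by omega), (show ¬ d ≥ 7 by omega)]
    · 
      by_cases h2 : d < 14
      · simp [(show ¬ d < 1 by omega), (show d ≥ 1 by omega), (show ¬ d < 7 by omega), (show d ≥ 7 by omega), (show d < 14 by omega), (show ¬ d ≥ 14 by omega)]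
      · 
        by_cases h3 : d < 30
        · simp [(show ¬ d < 1 by omega), (show d ≥ 1 by omega), (show ¬ d < 7 by omega), (show d ≥ 7 by omega), (show ¬ d < 14 by omega), (show d ≥ 14 by omega), (show d < 30 by omega), (show ¬ d ≥ 30 by omega)]
        · 
          by_cases h4 : d < 60
          · simp [(show ¬ d < 1 by omega), (show d ≥ 1 by omega), (show ¬ d < 7 by omega), (show d ≥ 7 by omega), (show ¬ d < 14 by omega), (show d ≥ 14 by omega), (show ¬ d < 30 by omega), (show d ≥ 30 by omega), (show d < 60 by omega), (show ¬ d ≥ 60 by omega)]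
          · 
            by_cases h5 : d < 90
            · simp [(show ¬ d < 1 by omega), (show d ≥ 1 by omega), (show ¬ d < 7 by omega), (show d ≥ 7 by omega), (show ¬ d < 14 by omega), (show d ≥ 14 by omega), (show ¬ d < 30 by omega), (show d ≥ 30 by omega), (show ¬ d < 60 by omega), (show d ≥ 60 by omega), (show d < 90 by omega), (show ¬ d ≥ 90 by omega)]
            · 
              by_cases h6 : d < 180
              · simp [(show ¬ d < 1 by omega), (show d ≥ 1 by omega), (show ¬ d < 7 by omega), (show d ≥ 7 by omega), (show ¬ d < 14 by omega), (show d ≥ 14 by omega), (show ¬ d < 30 by omega), (show d ≥ 30 by omega), (show ¬ d < 60 by omega), (show d ≥ 60 by omega), (show ¬ d < 90 by omega), (show d ≥ 90 by omega), (show d < 180 by omega), (show ¬ d ≥ 180 by omega)]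
              · 
                by_cases h7 : d < 270
                · simp [(show ¬ d < 1 by omega), (show d ≥ 1 by omega), (show ¬ d < 7 by omega), (show d ≥ 7 by omega), (show ¬ d < 14 by omega), (show d ≥ 14 by omega), (show ¬ d < 30 by omega), (show d ≥ 30 by omega), (show ¬ d < 60 by omega), (show d ≥ 60 by omega), (show ¬ d < 90 by omega), (show d ≥ 90 by omega), (show ¬ d < 180 by omega), (show d ≥ 180 by omega), (show d < 270 by omega), (show ¬ d ≥ 270 by omega)]
                · 
                  by_cases h8 : d < 365
                  · simp [(show ¬ d < 1 by omega), (show d ≥ 1 by omega), (show ¬ d < 7 by omega), (show d ≥ 7 by omega), (show ¬ d < 14 by omega), (show d ≥ 14 by omega), (show ¬ d < 30 by omega), (show d ≥ 30 by omega), (show ¬ d < 60 by omega), (show d ≥ 60 by omega), (show ¬ d < 90 by omega), (show d ≥ 90 by omega), (show ¬ d < 180 by omega), (show d ≥ 180 by omega), (show ¬ d < 270 by omega), (show d ≥ 270 by omega), (show d < 365 by omega), (show ¬ d ≥ 365 by omega)]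
                  · 
                    by_cases h9 : d < 500
                    · simp [(show ¬ d < 1 by omega), (show d ≥ 1 by omega), (show ¬ d < 7 by omega), (show d ≥ 7 by omega), (show ¬ d < 14 by omega), (show d ≥ 14 by omega), (show ¬ d < 30 by omega), (show d ≥ 30 by omega), (show ¬ d < 60 by omega), (show d ≥ 60 by omega), (show ¬ d < 90 by omega), (show d ≥ 90 by omega), (show ¬ d < 180 by omega), (show d ≥ 180 by omega), (show ¬ d < 270 by omega), (show d ≥ 270 by omega), (show ¬ d < 365 by omega), (show d ≥ 365 by omega), (show d < 500 by omega), (show ¬ d ≥ 500 by omega)]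
                    · 
                      by_cases h10 : d < 730
                      · simp [(show ¬ d < 1 by omega), (show d ≥ 1 by omega), (show ¬ d < 7 by omega), (show d ≥ 7 by omega), (show ¬ d < 14 by omega), (show d ≥ 14 by omega), (show ¬ d < 30 by omega), (show d ≥ 30 by omega), (show ¬ d < 60 by omega), (show d ≥ 60 by omega), (show ¬ d < 90 by omega), (show d ≥ 90 by omega), (show ¬ d < 180 by omega), (show d ≥ 180 by omega), (show ¬ d < 270 by omega), (show d ≥ 270 by omega), (show ¬ d < 365 by omega), (show d ≥ 365 by omega), (show ¬ d < 500 by omega), (show d ≥ 500 by omega), (show d < 730 by omega), (show ¬ d ≥ 730 by omega)]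
                      · 
                        by_cases h11 : d < 1095
                        · simp [(show ¬ d < 1 by omega), (show d ≥ 1 by omega), (show ¬ d < 7 by omega), (show d ≥ 7 by omega), (show ¬ d < 14 by omega), (show d ≥ 14 by omega), (show ¬ d < 30 by omega), (show d ≥ 30 by omega), (show ¬ d < 60 by omega), (show d ≥ 60 by omega), (show ¬ d < 90 by omega), (show d ≥ 90 by omega), (show ¬ d < 180 by omega), (show d ≥ 180 by omega), (show ¬ d < 270 by omega), (show d ≥ 270 by omega), (show ¬ d < 365 by omega), (show d ≥ 365 by omega), (show ¬ d < 500 by omega), (show d ≥ 500 by omega), (show ¬ d < 730 by omega), (show d ≥ 730 by omega), (show d < 1095 by omega), (show ¬ d ≥ 1095 by omega)]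
                        · 
                          by_cases h12 : d < 1825
                          · simp [(show ¬ d < 1 by omega), (show d ≥ 1 by omega), (show ¬ d < 7 by omega), (show d ≥ 7 by omega), (show ¬ d < 14 by omega), (show d ≥ 14 by omega), (show ¬ d < 30 by omega), (show d ≥ 30 by omega), (show ¬ d < 60 by omega), (show d ≥ 60 by omega), (show ¬ d < 90 by omega), (show d ≥ 90 by omega), (show ¬ d < 180 by omega), (show d ≥ 180 by omega), (show ¬ d < 270 by omega), (show d ≥ 270 by omega), (show ¬ d < 365 by omega), (show d ≥ 365 by omega), (show ¬ d < 500 by omega), (show d ≥ 500 by omega), (show ¬ d < 730 by omega), (show d ≥ 730 by omega), (show ¬ d < 1095 by omega), (show d ≥ 1095 by omega), (show d < 1825 by omega), (show ¬ d ≥ 1825 by omega)]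
                          · 
                            by_cases h13 : d < 2555
                            · simp [(show ¬ d < 1 by omega), (show d ≥ 1 by omega), (show ¬ d < 7 by omega), (show d ≥ 7 by omega), (show ¬ d < 14 by omega), (show d ≥ 14 by omega), (show ¬ d < 30 by omega), (show d ≥ 30 by omega), (show ¬ d < 60 by omega), (show d ≥ 60 by omega), (show ¬ d < 90 by omega), (show d ≥ 90 by omega), (show ¬ d < 180 by omega), (show d ≥ 180 by omega), (show ¬ d < 270 by omega), (show d ≥ 270 by omega), (show ¬ d < 365 by omega), (show d ≥ 365 by omega), (show ¬ d < 500 by omega), (show d ≥ 500 by omega), (show ¬ d < 730 by omega), (show d ≥ 730 by omega), (show ¬ d < 1095 by omega), (show d ≥ 1095 by omega), (show ¬ d < 1825 by omega), (show d ≥ 1825 by omega), (show d < 2555 by omega), (show ¬ d ≥ 2555 by omega)]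
                            · 
                              by_cases h14 : d < 3650
                              · simp [(show ¬ d < 1 by omega), (show d ≥ 1 by omega), (show ¬ d < 7 by omega), (show d ≥ 7 by omega), (show ¬ d < 14 by omega), (show d ≥ 14 by omega), (show ¬ d < 30 by omega), (show d ≥ 30 by omega), (show ¬ d < 60 by omega), (show d ≥ 60 by omega), (show ¬ d < 90 by omega), (show d ≥ 90 by omega), (show ¬ d < 180 by omega), (show d ≥ 180 by omega), (show ¬ d < 270 by omega), (show d ≥ 270 by omega), (show ¬ d < 365 by omega), (show d ≥ 365 by omega), (show ¬ d < 500 by omega), (show d ≥ 500 by omega), (show ¬ d < 730 by omega), (show d ≥ 730 by omega), (show ¬ d < 1095 by omega), (show d ≥ 1095 by omega), (show ¬ d < 1825 by omega), (show d ≥ 1825 by omega), (show ¬ d < 2555 by omega), (show d ≥ 2555 by omega), (show d < 3650 by omega), (show ¬ d ≥ 3650 by omega)]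
                              · 
                                by_cases h15 : d < 9131
                                · simp [(show ¬ d < 1 by omega), (show d ≥ 1 by omega), (show ¬ d < 7 by omega), (show d ≥ 7 by omega), (show ¬ d < 14 by omega), (show d ≥ 14 by omega), (show ¬ d < 30 by omega), (show d ≥ 30 by omega), (show ¬ d < 60 by omega), (show d ≥ 60 by omega), (show ¬ d < 90 by omega), (show d ≥ 90 by omega), (show ¬ d < 180 by omega), (show d ≥ 180 by omega), (show ¬ d < 270 by omega), (show d ≥ 270 by omega), (show ¬ d < 365 by omega), (show d ≥ 365 by omega), (show ¬ d < 500 by omega), (show d ≥ 500 by omega), (show ¬ d < 730 by omega), (show d ≥ 730 by omega), (show ¬ d < 1095 by omega), (show d ≥ 1095 by omega), (show ¬ d < 1825 by omega), (show d ≥ 1825 by omega), (show ¬ d < 2555 by omega), (show d ≥ 2555 by omega), (show ¬ d < 3650 by omega), (show d ≥ 3650 by omega), (show d < 9131 by omega), (show ¬ d ≥ 9131 by omega)]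
                                · 
                                  by_cases h16 : d < 18262
                                  · simp [(show ¬ d < 1 by omega), (show d ≥ 1 by omega), (show ¬ d < 7 by omega), (show d ≥ 7 by omega), (show ¬ d < 14 by omega), (show d ≥ 14 by omega), (show ¬ d < 30 by omega), (show d ≥ 30 by omega), (show ¬ d < 60 by omega), (show d ≥ 60 by omega), (show ¬ d < 90 by omega), (show d ≥ 90 by omega), (show ¬ d < 180 by omega), (show d ≥ 180 by omega), (show ¬ d < 270 by omega), (show d ≥ 270 by omega), (show ¬ d < 365 by omega), (show d ≥ 365 by omega), (show ¬ d < 500 by omega), (show d ≥ 500 by omega), (show ¬ d < 730 by omega), (show d ≥ 730 by omega), (show ¬ d < 1095 by omega), (show d ≥ 1095 by omega), (show ¬ d < 1825 by omega), (show d ≥ 1825 by omega), (show ¬ d < 2555 by omega), (show d ≥ 2555 by omega), (show ¬ d < 3650 by omega), (show d ≥ 3650 by omega), (show ¬ d < 9131 by omega), (show d ≥ 9131 by omega), (show d < 18262 by omega), (show ¬ d ≥ 18262 by omega)]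
                                  · simp [(show ¬ d < 1 by omega), (show d ≥ 1 by omega), (show ¬ d < 7 by omega), (show d ≥ 7 by omega), (show ¬ d < 14 by omega), (show d ≥ 14 by omega), (show ¬ d < 30 by omega), (show d ≥ 30 by omega), (show ¬ d < 60 by omega), (show d ≥ 60 by omega), (show ¬ d < 90 by omega), (show d ≥ 90 by omega), (show ¬ d < 180 by omega), (show d ≥ 180 by omega), (show ¬ d < 270 by omega), (show d ≥ 270 by omega), (show ¬ d < 365 by omega), (show d ≥ 365 by omega), (show ¬ d < 500 by omega), (show d ≥ 500 by omega), (show ¬ d < 730 by omega), (show d ≥ 730 by omega), (show ¬ d < 1095 by omega), (show d ≥ 1095 by omega), (show ¬ d < 1825 by omega), (show d ≥ 1825 by omega), (show ¬ d < 2555 by omega), (show d ≥ 2555 by omega), (show ¬ d < 3650 by omega), (show d ≥ 3650 by omega), (show ¬ d < 9131 by omega), (show d ≥ 9131 by omega), (show ¬ d < 18262 by omega), (show d ≥ 18262 by omega)]
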